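-- pv_equiv track=rewrite | github.com/AygunVarol/jazzhiphop-generator | music/piano_voicings.py | _get_scale_degrees
-- ===== SOURCE A (Python) =====
-- def _get_scale_degrees(key):
--     """Get MIDI note numbers for scale degrees"""
--     key_roots = {
--         'C': 60, 'Db': 61, 'D': 62, 'Eb': 63, 'E': 64, 'F': 65,
--         'Gb': 66, 'G': 67, 'Ab': 68, 'A': 69, 'Bb': 70, 'B': 71,
--         'Dm': 62, 'Em': 64, 'Am': 69, 'Fm': 65, 'Gm': 67, 'Cm': 60
--     }
--
--     root = key_roots.get(key, 60)
--
--     if 'm' not in key: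
--         intervals = [0, 2, 4, 5, 7, 9, 11]  # Major scale
--     else:
--         intervals = [0, 2, 3, 5, 7, 8, 10]  # Natural minor scale
--
--     return [root + interval for interval in intervals]
-- ===== SOURCE B (Python) =====
-- def _get_scale_degrees(key):
--     """Get MIDI note numbers for scale degrees"""
--     key_roots = {
--         'C': 60, 'Db': 61, 'D': 62, 'Eb': 63, 'E': 64, 'F': 65,
--         'Gb': 66, 'G': 67, 'Ab': 68, 'A': 69, 'Bb': 70, 'B': 71,
--         'Dm': 62, 'Em': 64, 'Am': 69, 'Fm': 65, 'Gm': 67, 'Cm': 60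
--     }
--
--     root = key_roots.get(key, 60)
--     steps = [2, 1, 2, 2, 1, 2] if 'm' in key else [2, 2, 1, 2, 2, 2]
--
--     notes = [root]
--     current = root
--     for step in steps:
--         current += step
--         notes.append(current)
--     return notes
-- ===== Notes on version B (the rewrite author's own statement) =====
-- stated objective: alternative
-- what changed: Replaced the absolute-interval offset lists mapped over the root with whole/half step patterns threaded through a running-pitch accumulator loop.
import Mathlib
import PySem

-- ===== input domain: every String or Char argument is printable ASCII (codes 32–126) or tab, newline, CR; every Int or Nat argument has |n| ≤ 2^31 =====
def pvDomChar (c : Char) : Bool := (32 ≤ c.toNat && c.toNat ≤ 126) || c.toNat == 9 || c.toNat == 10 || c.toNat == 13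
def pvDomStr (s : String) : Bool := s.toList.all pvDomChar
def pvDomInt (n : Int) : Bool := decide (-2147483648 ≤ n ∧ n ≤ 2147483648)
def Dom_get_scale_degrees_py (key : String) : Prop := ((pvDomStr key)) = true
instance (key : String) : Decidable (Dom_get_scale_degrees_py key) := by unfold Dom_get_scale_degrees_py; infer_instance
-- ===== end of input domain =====

-- B builds the 7 scale notes by threading a running-pitch accumulator over step patterns
-- instead of mapping absolute interval offsets (objective: alternative decomposition).


-- ===== PORT A =====
def pvKeyRoots : PySem.Dict String Int :=
  (((((((((((((((((((PySem.Dict.empty).insert "C" 60).insert "Db" 61).insert "D" 62).insert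
    "Eb" 63).insert "E" 64).insert "F" 65).insert "Gb" 66).insert "G" 67).insert
    "Ab" 68).insert "A" 69).insert "Bb" 70).insert "B" 71).insert "Dm" 62).insert
    "Em" 64).insert "Am" 69).insert "Fm" 65).insert "Gm" 67).insert "Cm" 60)

def get_scale_degrees_py (key : String) : List Int :=
  let root := pvKeyRoots.getD key 60
  let intervals : List Int :=
    if ¬ (PySem.Str.isIn "m" key = true) then [0, 2, 4, 5, 7, 9, 11]
    else [0, 2, 3, 5, 7, 8, 10]
  intervals.map (fun interval => root + interval)

-- ===== PORT B =====
def get_scale_degrees_py_alt (key : String) : List Int :=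
  let root := pvKeyRoots.getD key 60
  let steps : List Int :=
    if PySem.Str.isIn "m" key then [2, 1, 2, 2, 1, 2] else [2, 2, 1, 2, 2, 2]
  -- explicit loop threading `current`, appending each new pitch
  (steps.foldl (fun (st : List Int × Int) step =>
      (st.1 ++ [st.2 + step], st.2 + step)) ([root], root)).1

-- ===== PRECONDITION & SPEC =====
def Spec_get_scale_degrees_py (key : String) (out : List Int) : Prop := out = get_scale_degrees_py_alt key
instance (key : String) (out : List Int) : Decidable (Spec_get_scale_degrees_py key out) := by unfold Spec_get_scale_degrees_py; infer_instance

-- ===== CLAIM (what is proved, stated in full; the proofs are below) =====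
def Claim_equal_get_scale_degrees_py : Prop := ∀ (key : String), Dom_get_scale_degrees_py key → Spec_get_scale_degrees_py key (get_scale_degrees_py key)

-- ===== LEMMAS AND PROOFS =====
theorem pv_branches (root : Int) :
    ([0, 2, 4, 5, 7, 9, 11] : List Int).map (fun i => root + i) =
      (([2, 2, 1, 2, 2, 2] : List Int).foldl (fun (st : List Int × Int) step =>
        (st.1 ++ [st.2 + step], st.2 + step)) ([root], root)).1 ∧
    ([0, 2, 3, 5, 7, 8, 10] : List Int).map (fun i => root + i) =
      (([2, 1, 2, 2, 1, 2] : List Int).foldl (fun (st : List Int × Int) step =>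
        (st.1 ++ [st.2 + step], st.2 + step)) ([root], root)).1 := by
  simp [List.foldl]
  omega

-- ===== VERDICT (by name: the statement is the Claim_ definition above) =====
theorem get_scale_degrees_py_spec : Claim_equal_get_scale_degrees_py := by
  intro key _
  unfold Spec_get_scale_degrees_py get_scale_degrees_py get_scale_degrees_py_alt
  by_cases h : PySem.Str.isIn "m" key = true
  · simp only [h, not_true, if_neg, if_pos, not_false_iff]
    exact (pv_branches _).2
  · simp only [Bool.not_eq_true] at h
    simp only [h, Bool.false_eq_true, not_false_iff, if_pos, if_neg]
    exact (pv_branches _).1
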